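-- pv_equiv track=rewrite | github.com/grlinski/codeabbey-python-solutions | CA Four Pics One Word.py | createWordStart
-- ===== SOURCE A (Python) =====
-- from itertools import permutations
--
-- def createWordStart(letters):
--     x = permutations(letters,4)
--     words = []
--
--     for i in x:
--         y = ''
--         y +=str(i[0])+str(i[1])+str(i[2])+str(i[3])
--         words.append(y)
--     return words
-- ===== SOURCE B (Python) =====
-- def createWordStart(letters):
--     def go(prefix, rest, depth):
--         if depth == 0:
--             return [prefix]
--         words = []
--         for idx in range(len(rest)):
--             words.extend(go(prefix + str(rest[idx]),
--                             rest[:idx] + rest[idx + 1:],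
--                             depth - 1))
--         return words
--     return go('', list(letters), 4)
-- ===== Notes on version B (the rewrite author's own statement) =====
-- stated objective: alternative
-- what changed: Replaces the itertools.permutations(letters,4) iterator with recursive backtracking that builds each word by picking an element and recursing on the remaining-elements list (rest[:idx]+rest[idx+1:]), instead of enumerating index tuples.
import Mathlib
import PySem

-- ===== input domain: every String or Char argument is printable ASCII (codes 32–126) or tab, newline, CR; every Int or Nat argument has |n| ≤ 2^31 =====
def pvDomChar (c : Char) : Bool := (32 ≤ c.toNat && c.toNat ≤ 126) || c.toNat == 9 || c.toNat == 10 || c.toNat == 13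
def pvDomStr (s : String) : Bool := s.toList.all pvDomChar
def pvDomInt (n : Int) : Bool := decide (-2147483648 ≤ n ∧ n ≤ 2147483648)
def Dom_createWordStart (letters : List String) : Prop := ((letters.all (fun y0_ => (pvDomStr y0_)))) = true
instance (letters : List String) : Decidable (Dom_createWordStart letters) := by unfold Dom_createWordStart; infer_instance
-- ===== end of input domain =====

-- B replaces the itertools.permutations(letters,4) iterator by recursive backtracking
-- over the list of remaining elements (objective: alternative algorithm, same cost).

-- ===== PORT A =====
-- itertools.permutations(pool, 4) ported per its documentation: all 4-tuples of elements
-- at DISTINCT indices, enumerated in lexicographic index order (exact for list input).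
def pyPerm4 (pool : List String) : List (String × String × String × String) :=
  let n := pool.length
  (List.range n).flatMap fun i =>
    (List.range n).flatMap fun j =>
      (List.range n).flatMap fun k =>
        (List.range n).flatMap fun l =>
          if i = j ∨ i = k ∨ i = l ∨ j = k ∨ j = l ∨ k = l then []
          else [(pool.getD i "", pool.getD j "", pool.getD k "", pool.getD l "")]

def createWordStart (letters : List String) : List String :=
  let x := pyPerm4 letters
  x.foldl (fun words t => words ++ ["" ++ t.1 ++ t.2.1 ++ t.2.2.1 ++ t.2.2.2]) []

-- ===== PORT B =====
-- go(prefix, rest, depth): pick each remaining element in order, recurse on rest with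
-- that position removed (rest[:idx] + rest[idx+1:]); str() on a str is the identity.
def goB (pre : String) (rest : List String) : Nat → List String
  | 0 => [pre]
  | d + 1 =>
    (List.range rest.length).foldl
      (fun words idx =>
        words ++ goB (pre ++ rest.getD idx "") (rest.take idx ++ rest.drop (idx + 1)) d)
      []

def createWordStart_alt (letters : List String) : List String :=
  goB "" letters 4

-- ===== PRECONDITION & SPEC =====
def Spec_createWordStart (letters : List String) (out : List String) : Prop := out = createWordStart_alt letters
instance (letters : List String) (out : List String) : Decidable (Spec_createWordStart letters out) := by unfold Spec_createWordStart; infer_instance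

-- ===== CLAIM (what is proved, stated in full; the proofs are below) =====
def Claim_equal_createWordStart : Prop := ∀ (letters : List String), Dom_createWordStart letters → Spec_createWordStart letters (createWordStart letters)

-- ===== LEMMAS AND PROOFS =====

-- DFS over the list of still-available indices into the fixed pool.
def permAvail (pool : List String) : Nat → List Nat → String → List String
  | 0, _, pre => [pre]
  | d + 1, avail, pre =>
    avail.flatMap fun j =>
      permAvail pool d (avail.filter (fun x => x != j)) (pre ++ pool.getD j "")

theorem flatMap_range_getD {α β : Type} (l : List α) (g : α → List β) (d₀ : α) :
    (List.range l.length).flatMap (fun t => g (l.getD t d₀)) = l.flatMap g := by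
  induction l generalizing g with
  | nil => simp
  | cons x xs ih =>
    simp only [List.length_cons, List.range_succ_eq_map, List.flatMap_cons, List.flatMap_map]
    simpa using congrArg (g x ++ ·) (ih (fun a => g a))

theorem flatMap_congr' {α β : Type} (l : List α) (f g : α → List β)
    (h : ∀ a ∈ l, f a = g a) : l.flatMap f = l.flatMap g := by
  induction l with
  | nil => rfl
  | cons x t ih =>
    simp only [List.flatMap_cons, h x (by simp)]
    rw [ih (fun a ha => h a (by simp [ha]))]

theorem filter_at_getElem {l : List Nat} (hn : l.Nodup) {t : Nat} (h : t < l.length) :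
    l.filter (fun x => x != l[t]) = l.eraseIdx t := by
  rw [← List.Nodup.erase_eq_filter hn, List.Nodup.erase_getElem hn]

-- MAIN: the available-index DFS equals B's backtracking on the mapped-out rest list.
theorem permAvail_eq_goB (pool : List String) :
    ∀ (d : Nat) (avail : List Nat) (pre : String), avail.Nodup →
      permAvail pool d avail pre = goB pre (avail.map (fun j => pool.getD j "")) d := by
  intro d
  induction d with
  | zero => intro avail pre _; rfl
  | succ d ih =>
    intro avail pre hnd
    rw [permAvail, goB, PySem.List.foldl_append_eq_flatMap]
    rw [← flatMap_range_getD avail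
      (fun j => permAvail pool d (avail.filter (fun x => x != j)) (pre ++ pool.getD j "")) 0]
    simp only [List.length_map]
    apply flatMap_congr'
    intro t ht
    have htl : t < avail.length := by simpa using List.mem_range.mp ht
    have hgd : avail.getD t 0 = avail[t] := List.getD_eq_getElem avail 0 htl
    have hmapgd : (avail.map (fun j => pool.getD j "")).getD t "" = pool.getD avail[t] "" := by
      rw [List.getD_eq_getElem _ _ (by simpa using htl)]
      simp
    have herase : (avail.map (fun j => pool.getD j "")).take t ++
        (avail.map (fun j => pool.getD j "")).drop (t + 1)
        = (avail.eraseIdx t).map (fun j => pool.getD j "") := by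
      rw [← List.eraseIdx_eq_take_drop_succ, List.eraseIdx_map]
    rw [hgd, hmapgd, herase, filter_at_getElem hnd htl]
    exact ih (avail.eraseIdx t) (pre ++ pool.getD avail[t] "") (List.Nodup.eraseIdx t hnd)

theorem flatMap_if_filter {α β : Type} (l : List α) (p : α → Bool) (g : α → List β) :
    (l.filter p).flatMap g = l.flatMap (fun x => if p x then g x else []) := by
  induction l with
  | nil => rfl
  | cons x xs ih =>
    by_cases h : p x = true <;> simp [h, ih]

theorem map_getD_range (pool : List String) :
    (List.range pool.length).map (fun j => pool.getD j "") = pool := by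
  apply List.ext_getElem
  · simp
  · intro i h1 h2
    simp [List.getD, List.getElem?_eq_getElem h2]

-- A (as nested index flatMaps) equals the available-index DFS started from range n.
theorem A_eq_permAvail (pool : List String) :
    createWordStart pool = permAvail pool 4 (List.range pool.length) "" := by
  unfold createWordStart pyPerm4
  rw [PySem.List.foldl_append_eq_flatMap]
  simp only [List.flatMap_assoc]
  show _ = permAvail pool 4 (List.range pool.length) ""
  simp only [permAvail, flatMap_if_filter]
  apply flatMap_congr'; intro i _
  apply flatMap_congr'; intro j _
  by_cases hj : j = i
  · subst hj; simp
  · rw [if_pos (bne_iff_ne.mpr hj)]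
    apply flatMap_congr'; intro k _
    by_cases hk : k = i ∨ k = j
    · rcases hk with hk | hk <;> (subst hk; simp)
    · push Not at hk
      rw [if_pos (show (k != i) = true from bne_iff_ne.mpr hk.1),
        if_pos (show (k != j) = true from bne_iff_ne.mpr hk.2)]
      apply flatMap_congr'; intro l _
      by_cases hl : l = i ∨ l = j ∨ l = k
      · rcases hl with hl | hl | hl <;> (subst hl; simp)
      · push Not at hl
        rw [if_pos (show (l != i) = true from bne_iff_ne.mpr hl.1),
          if_pos (show (l != j) = true from bne_iff_ne.mpr hl.2.1),
          if_pos (show (l != k) = true from bne_iff_ne.mpr hl.2.2)]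
        rw [if_neg (by
          rintro (h|h|h|h|h|h) <;>
            first | exact hj h.symm | exact hk.1 h.symm | exact hk.2 h.symm |
              exact hl.1 h.symm | exact hl.2.1 h.symm | exact hl.2.2 h.symm)]
        simp

theorem createWordStart_eq_alt (letters : List String) :
    createWordStart letters = createWordStart_alt letters := by
  rw [A_eq_permAvail, createWordStart_alt,
    permAvail_eq_goB letters 4 (List.range letters.length) "" List.nodup_range,
    map_getD_range]

-- ===== VERDICT (by name: the statement is the Claim_ definition above) =====
theorem createWordStart_spec : Claim_equal_createWordStart := by
  intro letters _
  exact createWordStart_eq_alt letters
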